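-- pv_equiv track=rewrite | github.com/GuilhermeFornaciari/NotasRO | Class_aluno.py | padronizarnome
-- ===== SOURCE A (Python) =====
-- def padronizarnome(linha):  # Trata o nome para remover incoerências oriundas de erros humanos
--     caracteresespeciais = "!@#$%¨&*()-=_+,[]{}^~´`/\?°" + "'" + '"'
--     nome = linha.upper()
--
--     for caracter in caracteresespeciais:
--         if caracter in nome:
--             nome = nome.replace(caracter, "")
--     while nome[0] == " ":
--         nome = nome.replace(" ", "", 1)
--     return nome
-- ===== SOURCE B (Python) =====
-- def padronizarnome(linha):  # Simpler one-pass filter over a precomputed set; same uppercase/strip behaviour as A (raises IndexError on empty/all-space results, like A)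
--     special = set("!@#$%¨&*()-=_+,[]{}^~´`/\?°" + "'" + '"')
--     nome = "".join(c for c in linha.upper() if c not in special)
--     i = 0
--     while nome[i] == " ":
--         i += 1
--     return nome[i:]
-- ===== Notes on version B (the rewrite author's own statement) =====
-- stated objective: idiomatic
-- what changed: B makes one pass over the uppercased input keeping characters not in a precomputed set, instead of A's loop over the 29 special characters doing a substring search and a full replace pass for each; leading spaces are skipped with an index instead of repeated replace(' ','',1). Pre_ excludes inputs on which A raises IndexError (empty, or all characters removed/space after filtering); B raises IndexError there too.
-- outside the precondition, e.g. on padronizarnome(''): A raises IndexError, B raises IndexError; on padronizarnome(' '): A raises IndexError, B raises IndexError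
import Mathlib
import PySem

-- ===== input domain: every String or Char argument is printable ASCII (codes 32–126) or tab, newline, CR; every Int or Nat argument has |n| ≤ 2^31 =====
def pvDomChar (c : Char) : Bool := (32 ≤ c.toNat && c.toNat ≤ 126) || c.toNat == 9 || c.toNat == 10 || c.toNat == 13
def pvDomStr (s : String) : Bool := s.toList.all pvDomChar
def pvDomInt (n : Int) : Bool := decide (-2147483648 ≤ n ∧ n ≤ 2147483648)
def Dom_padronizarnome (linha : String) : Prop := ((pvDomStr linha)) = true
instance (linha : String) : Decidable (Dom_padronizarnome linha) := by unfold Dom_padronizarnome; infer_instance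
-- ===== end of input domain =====

-- B: one pass over the uppercased input filtering against a precomputed character set (idiomatic), instead of A's per-special-character replace passes; same values wherever A returns.


-- ===== PORT A =====
-- nome.replace(" ", "", 1): remove the first occurrence of " "
def pvReplaceFirstSpace : List Char → List Char
  | [] => []
  | c :: r => if c = ' ' then r else c :: pvReplaceFirstSpace r

-- while nome[0] == " ": nome = nome.replace(" ", "", 1)   ([] = where Python raises IndexError; excluded by Pre_)
def pvStripLoopA : List Char → List Char
  | [] => []
  | c :: rest =>
    if h : c = ' ' then pvStripLoopA (pvReplaceFirstSpace (c :: rest)) else c :: rest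
  termination_by l => l.length
  decreasing_by simp [pvReplaceFirstSpace, h]

def padronizarnome (linha : String) : String :=
  let caracteresespeciais := ("!@#$%¨&*()-=_+,[]{}^~´`/\\?°" ++ "'" ++ "\"").toList
  let nome := (PySem.Str.upper linha).toList
  let nome := caracteresespeciais.foldl
    (fun nome caracter =>
      if PySem.Chars.isIn [caracter] nome then PySem.Chars.replace nome [caracter] [] else nome)
    nome
  String.mk (pvStripLoopA nome)

-- ===== PORT B =====
-- i = 0; while nome[i] == " ": i += 1   ([] = where Python raises IndexError; excluded by Pre_)
def pvSkipSpacesB : List Char → Nat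
  | [] => 0
  | c :: r => if c = ' ' then pvSkipSpacesB r + 1 else 0

def padronizarnome_alt (linha : String) : String :=
  let special : PySem.Set Char := PySem.Set.ofList ("!@#$%¨&*()-=_+,[]{}^~´`/\\?°" ++ "'" ++ "\"").toList
  let nome := (PySem.Chars.upper linha.toList).filter (fun c => !(PySem.Set.contains special c))
  String.mk (PySem.List.slice nome (some ((pvSkipSpacesB nome : Nat) : Int)) none)

-- ===== PRECONDITION & SPEC =====
def pvSpecials : List Char := ("!@#$%¨&*()-=_+,[]{}^~´`/\\?°" ++ "'" ++ "\"").toList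

-- Pre_ excludes exactly the inputs on which Python A raises IndexError: those whose uppercased,
-- special-stripped form is empty or all spaces (nome[0] / the while loop runs off the string).
def Pre_padronizarnome (linha : String) : Prop :=
  linha.toList.any
    (fun c => !(pvSpecials.contains (PySem.Chars.upperChar c)) && (PySem.Chars.upperChar c != ' ')) = true
instance (linha : String) : Decidable (Pre_padronizarnome linha) := by unfold Pre_padronizarnome; infer_instance
def pvWitness_padronizarnome : String := "A"

def Spec_padronizarnome (linha : String) (out : String) : Prop := out = padronizarnome_alt linha
instance (linha : String) (out : String) : Decidable (Spec_padronizarnome linha out) := by unfold Spec_padronizarnome; infer_instance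

-- ===== CLAIM (what is proved, stated in full; the proofs are below) =====
def Claim_equal_padronizarnome : Prop := ∀ (linha : String), Dom_padronizarnome linha → Pre_padronizarnome linha → Spec_padronizarnome linha (padronizarnome linha)

-- ===== LEMMAS AND PROOFS =====

-- replace.go with a single-character pattern and empty replacement is a filter
lemma pv_replace_go_single (c : Char) :
    ∀ (fuel : Nat) (l acc : List Char), l.length ≤ fuel →
      PySem.Chars.replace.go [c] [] fuel l acc = acc.reverse ++ l.filter (fun x => x ≠ c) := by
  intro fuel
  induction fuel with
  | zero => intro l acc h; cases l with
    | nil => simp [PySem.Chars.replace.go]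
    | cons a r => simp at h
  | succ n ih =>
    intro l acc h
    cases l with
    | nil => simp [PySem.Chars.replace.go]
    | cons a r =>
      by_cases hc : a = c
      · subst hc
        have hp : List.isPrefixOf [a] (a :: r) = true := by simp [List.isPrefixOf]
        simp only [PySem.Chars.replace.go, hp, if_pos, List.length_cons, List.length_nil,
          List.drop_succ_cons, List.drop_zero, List.reverse_nil, List.nil_append]
        rw [ih r acc (by simpa using Nat.le_of_succ_le_succ h)]
        simp [List.filter]
      · have hp : List.isPrefixOf [c] (a :: r) = false := by
          simp [List.isPrefixOf]; exact fun hh => (hc hh.symm).elim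
        simp only [PySem.Chars.replace.go, hp]
        rw [if_neg (by simp), ih r (a :: acc) (by simpa using Nat.le_of_succ_le_succ h)]
        simp [List.filter, hc]

lemma pv_replace_single (c : Char) (l : List Char) :
    PySem.Chars.replace l [c] [] = l.filter (fun x => x ≠ c) := by
  have h : ([c] : List Char).isEmpty = false := rfl
  simp only [PySem.Chars.replace, h, Bool.false_eq_true, if_false]
  simpa using pv_replace_go_single c l.length l [] le_rfl

-- A's for-loop over the special characters equals B's single filter pass
lemma pv_foldl_replace_eq_filter (S : List Char) :
    ∀ l : List Char,
      S.foldl (fun nome caracter =>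
          if PySem.Chars.isIn [caracter] nome then PySem.Chars.replace nome [caracter] [] else nome) l
        = l.filter (fun x => !(S.contains x)) := by
  induction S with
  | nil => intro l; simp
  | cons c S ih =>
    intro l
    have hstep : (if PySem.Chars.isIn [c] l then PySem.Chars.replace l [c] [] else l)
        = l.filter (fun x => x ≠ c) := by
      by_cases hin : PySem.Chars.isIn [c] l = true
      · simp [hin, pv_replace_single]
      · have hnc : c ∉ l := by
          intro hmem
          obtain ⟨s, t, hst⟩ := List.append_of_mem hmem
          exact hin ((PySem.Chars.isIn_iff_infix (sub := [c]) (s := l)).mpr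
            ⟨s, t, by rw [hst]; simp⟩)
        have hself : l.filter (fun x => x ≠ c) = l := by
          apply List.filter_eq_self.mpr
          intro x hx
          simp only [ne_eq, decide_eq_true_eq]
          rintro rfl; exact hnc hx
        rw [if_neg hin, hself]
    rw [List.foldl_cons, hstep, ih, List.filter_filter]
    apply List.filter_congr
    intro x _
    by_cases hx : x = c <;> simp [hx]

-- A's while-loop equals dropping B's leading-space count
lemma pv_strip_eq_drop : ∀ l : List Char, pvStripLoopA l = l.drop (pvSkipSpacesB l) := by
  intro l
  induction l with
  | nil => simp [pvStripLoopA, pvSkipSpacesB]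
  | cons c r ih =>
    by_cases h : c = ' '
    · subst h
      rw [pvStripLoopA, dif_pos rfl]
      have hr : pvReplaceFirstSpace (' ' :: r) = r := by simp [pvReplaceFirstSpace]
      rw [hr, ih]
      simp [pvSkipSpacesB]
    · rw [pvStripLoopA, dif_neg h]
      simp [pvSkipSpacesB, h]

-- membership in set(specials) is membership in the specials string
lemma pv_contains_ofList {S : List Char} (x : Char) :
    PySem.Set.contains (PySem.Set.ofList S) x = S.contains x := by
  simp [PySem.Set.contains_eq_listContains]

-- ===== VERDICT (by name: the statement is the Claim_ definition above) =====
theorem padronizarnome_spec : Claim_equal_padronizarnome := by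
  intro linha _ _
  simp only [Spec_padronizarnome, padronizarnome, padronizarnome_alt, PySem.Str.toList_upper]
  rw [pv_foldl_replace_eq_filter, pv_strip_eq_drop, PySem.List.slice_from_natCast]
  have hf : (PySem.Chars.upper linha.toList).filter
        (fun x => !(("!@#$%¨&*()-=_+,[]{}^~´`/\\?°" ++ "'" ++ "\"").toList.contains x))
      = (PySem.Chars.upper linha.toList).filter
        (fun c => !(PySem.Set.contains (PySem.Set.ofList ("!@#$%¨&*()-=_+,[]{}^~´`/\\?°" ++ "'" ++ "\"").toList) c)) := by
    apply List.filter_congr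
    intro x _
    rw [pv_contains_ofList]
  rw [hf]
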